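-- pv_equiv track=rewrite | github.com/liskos/jakov | ege05/331.py | f
-- ===== SOURCE A (Python) =====
-- def f(n):
--     b = bin(n)[2:]
--     if n % 2 != 0:
--         b = b.replace('1','8')
--         b = b.replace('0','1')
--         b = b.replace('8','0')
--     d = ''
--     for i in b:
--         d += i * 2
--     return int(d,2)
-- ===== SOURCE B (Python) =====
-- def f(n):
--     # invert the bits of n (within its bit length) when n is odd, as A does on the digit string
--     v = n if n % 2 == 0 else n ^ ((1 << n.bit_length()) - 1)
--     # doubling every binary digit = reading the digit string in base 4 and tripling:
--     # spread the bits of v over base-4 places, then multiply by 3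
--     r, q = 0, 1
--     while v:
--         if v & 1:
--             r += q
--         v >>= 1
--         q *= 4
--     return 3 * r
-- ===== Notes on version B (the rewrite author's own statement) =====
-- stated objective: alternative
-- what changed: replaces A's string pipeline (bin()/three replace()s/digit-doubling loop/int(d,2)) by pure integer arithmetic: XOR with an all-ones mask for the odd-case bit inversion, a loop spreading the bits of the result over base-4 places, and a final *3
import Mathlib
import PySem

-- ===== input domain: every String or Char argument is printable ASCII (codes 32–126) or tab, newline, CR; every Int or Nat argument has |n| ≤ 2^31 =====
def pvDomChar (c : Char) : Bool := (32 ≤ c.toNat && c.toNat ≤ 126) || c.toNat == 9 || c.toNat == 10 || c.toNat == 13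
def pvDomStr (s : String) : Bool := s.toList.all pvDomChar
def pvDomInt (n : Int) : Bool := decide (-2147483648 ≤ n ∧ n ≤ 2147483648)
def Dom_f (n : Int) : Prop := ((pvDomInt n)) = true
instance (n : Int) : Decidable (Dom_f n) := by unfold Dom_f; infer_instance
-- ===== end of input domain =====

-- B replaces A's string pipeline (bin / three replace()s / digit-doubling loop / int(d,2))
-- by integer arithmetic: XOR with an all-ones mask for the odd-case inversion and a base-4
-- bit-spread loop, returning 3 * spread (same cost; no strings).


-- ===== PORT A =====
-- hand port of int(d, 2): left-to-right digit fold, none = ValueError.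
-- Exact for every string without whitespace, sign, '_' or a base prefix — the only shapes
-- `d` takes in f (binary digit chars for n ≥ 0; a string containing 'b' for n < 0, → none).
def pvInt2? (cs : List Char) : Option Int :=
  if cs = [] then none
  else cs.foldl (fun acc c =>
    match acc, PySem.Int.digitVal? c with
    | some a, some d => if d < 2 then some (a * 2 + (d : Int)) else none
    | _, _ => none) (some 0)

def f (n : Int) : Int :=
  -- b = bin(n)[2:]
  let b0 := PySem.List.slice (PySem.Int.toBinChars0b n) (some 2) none
  -- if n % 2 != 0: the three replace calls
  let b := if PySem.Int.mod n 2 ≠ 0 then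
      PySem.Chars.replace (PySem.Chars.replace (PySem.Chars.replace b0 ['1'] ['8']) ['0'] ['1']) ['8'] ['0']
    else b0
  -- d = ''; for i in b: d += i * 2
  let d := b.foldl (fun acc c => acc ++ [c, c]) ([] : List Char)
  -- return int(d, 2)
  (pvInt2? d).getD 0

-- ===== PORT B =====
-- while v: if v & 1: r += q; v >>= 1; q *= 4   (the 'v ≤ 0' guard only totalises the Lean
-- function: under Pre_f the loop variable v is never negative, and there 'while v' = 'while v > 0')
def pvSpread (v q r : Int) : Int :=
  if v ≤ 0 then r
  else pvSpread (v >>> (1 : Nat)) (q * 4) (if PySem.Int.band v 1 ≠ 0 then r + q else r)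
termination_by v.toNat
decreasing_by
  simp only [Int.shiftRight_eq_div_pow, pow_one]
  omega

def f_alt (n : Int) : Int :=
  -- v = n if n % 2 == 0 else n ^ ((1 << n.bit_length()) - 1)
  let v := if PySem.Int.mod n 2 = 0 then n
           else PySem.Int.bxor n (((1 : Int) <<< PySem.Int.bitLength n) - 1)
  -- r, q = 0, 1; while v: ...; return 3 * r
  3 * pvSpread v 1 0

-- ===== PRECONDITION & SPEC =====
-- Pre_f excludes exactly n < 0, on which A raises ValueError: bin(n)[2:] leaves the 'b' of
-- '-0b…' in the string passed to int(d, 2).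
def Pre_f (n : Int) : Prop := 0 ≤ n
instance (n : Int) : Decidable (Pre_f n) := by unfold Pre_f; infer_instance

def pvWitness_f : Int := 11

def Spec_f (n : Int) (out : Int) : Prop := out = f_alt n
instance (n : Int) (out : Int) : Decidable (Spec_f n out) := by unfold Spec_f; infer_instance

-- ===== CLAIM (what is proved, stated in full; the proofs are below) =====
def Claim_equal_f : Prop := ∀ (n : Int), Dom_f n → Pre_f n → Spec_f n (f n)

-- ===== LEMMAS AND PROOFS =====

-- the numeric "spread": the bits of m laid out in base-4 places
def pvS : Nat → Nat := fun m =>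
  if m = 0 then 0 else m % 2 + 4 * pvS (m / 2)
decreasing_by omega

theorem pvS_eq (m : Nat) : pvS m = if m = 0 then 0 else m % 2 + 4 * pvS (m / 2) := by
  rw [pvS]

theorem pvS_zero : pvS 0 = 0 := by rw [pvS_eq]; simp

theorem pvS_one : pvS 1 = 1 := by rw [pvS_eq]; simp [pvS_zero]

theorem digits01 (m : Nat) : ∀ c ∈ Nat.toDigits 2 m, c = '0' ∨ c = '1' := by
  induction m using Nat.strong_induction_on with
  | _ m ih =>
    intro c hc
    rcases Nat.lt_or_ge m 2 with h | h
    · rw [Nat.toDigits_of_lt_base h] at hc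
      simp only [List.mem_singleton] at hc
      subst hc
      interval_cases m
      · left; decide
      · right; decide
    · rw [Nat.toDigits_of_base_le (by omega) h] at hc
      rcases List.mem_append.mp hc with h' | h'
      · exact ih (m / 2) (by omega) c h'
      · have hlt : m % 2 < 2 := Nat.mod_lt _ (by omega)
        simp only [List.mem_singleton] at h'
        subst h'
        interval_cases hm : (m % 2)
        · left; decide
        · right; decide

-- str.replace with single-character pattern and replacement is a map
theorem replace_go_single (a b : Char) (fuel : Nat) (l acc : List Char) (h : l.length ≤ fuel) :
    PySem.Chars.replace.go [a] [b] fuel l acc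
      = acc.reverse ++ l.map (fun c => if c = a then b else c) := by
  induction fuel generalizing l acc with
  | zero =>
    have : l = [] := List.length_eq_zero_iff.mp (by omega)
    subst this
    simp [PySem.Chars.replace.go]
  | succ fuel ih =>
    cases l with
    | nil => simp [PySem.Chars.replace.go]
    | cons c t =>
      rw [PySem.Chars.replace.go]
      by_cases hc : c = a
      · subst hc
        have hpre : [c].isPrefixOf (c :: t) = true := by simp [List.isPrefixOf]
        simp only [hpre, if_pos]
        rw [ih _ _ (by simpa using Nat.le_of_succ_le_succ (by simpa using h))]
        simp
      · have hpre : [a].isPrefixOf (c :: t) = false := by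
          simp [List.isPrefixOf]
          exact fun hh => (hc hh.symm).elim
        rw [if_neg (by simp [hpre])]
        rw [ih _ _ (by simpa using Nat.le_of_succ_le_succ (by simpa using h))]
        simp [hc]

theorem replace_single (a b : Char) (s : List Char) :
    PySem.Chars.replace s [a] [b] = s.map (fun c => if c = a then b else c) := by
  rw [PySem.Chars.replace]
  simp only [List.isEmpty_cons]
  exact replace_go_single a b s.length s [] (le_refl _) |>.trans (by simp)

-- value of the doubled digit string under the int(·,2) fold, with accumulator
theorem pvInt2_fold (s : List Char) (h : ∀ c ∈ s, c = '0' ∨ c = '1') (a : Int) :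
    (s.flatMap (fun c => [c, c])).foldl (fun acc c =>
      match acc, PySem.Int.digitVal? c with
      | some a, some d => if d < 2 then some (a * 2 + (d : Int)) else none
      | _, _ => none) (some a)
    = some (s.foldl (fun x c => x * 4 + (if c = '1' then 3 else 0)) a) := by
  induction s generalizing a with
  | nil => simp
  | cons c t ih =>
    have ht := fun c hc => h c (List.mem_cons_of_mem _ hc)
    rcases h c (by simp) with rfl | rfl
    · simp only [List.flatMap_cons, List.cons_append, List.nil_append, List.foldl_cons,
        show PySem.Int.digitVal? '0' = some 0 from rfl,
        show ((0:Nat) < 2) = True from by simp, if_true,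
        show ('0' = '1') = False from by simp, if_false,
        Nat.cast_zero, add_zero]
      rw [show a * 2 * 2 = a * 4 from by ring]
      exact ih ht (a * 4)
    · simp only [List.flatMap_cons, List.cons_append, List.nil_append, List.foldl_cons,
        show PySem.Int.digitVal? '1' = some 1 from rfl,
        show ((1:Nat) < 2) = True from by simp, if_true, Nat.cast_one]
      rw [show (a * 2 + 1) * 2 + 1 = a * 4 + 3 from by ring]
      exact ih ht (a * 4 + 3)

-- factor 3 out of the base-4 fold
theorem fold4_factor (s : List Char) (a : Int) :
    s.foldl (fun x c => x * 4 + (if c = '1' then 3 else 0)) (3 * a)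
    = 3 * s.foldl (fun x c => x * 4 + (if c = '1' then 1 else 0)) a := by
  induction s generalizing a with
  | nil => simp
  | cons c t ih =>
    simp only [List.foldl_cons]
    by_cases hc : c = '1' <;> simp only [hc, reduceIte]
    · rw [show (3*a)*4 + 3 = 3*(a*4+1) from by ring]; exact ih (a*4+1)
    · simp only [add_zero]
      rw [show (3*a)*4 = 3*(a*4) from by ring]; exact ih (a*4)

-- plain base-4 value of the binary digits of m
theorem fold4_toDigits (m : Nat) (a : Int) :
    (Nat.toDigits 2 m).foldl (fun x c => x * 4 + (if c = '1' then 1 else 0)) a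
    = a * 4 ^ (Nat.toDigits 2 m).length + (pvS m : Int) := by
  induction m using Nat.strong_induction_on generalizing a with
  | _ m ih =>
    rcases Nat.lt_or_ge m 2 with h | h
    · interval_cases m
      · rw [Nat.toDigits_of_lt_base (by omega)]
        simp [pvS_zero, show Nat.digitChar 0 = '0' from rfl]
      · rw [Nat.toDigits_of_lt_base (by omega)]
        simp [pvS_one, show Nat.digitChar 1 = '1' from rfl]
    · rw [Nat.toDigits_of_base_le (by omega) h, List.foldl_append, List.length_append]
      rw [ih (m / 2) (by omega) a]
      have hS : pvS m = m % 2 + 4 * pvS (m / 2) := by rw [pvS_eq]; simp [show m ≠ 0 by omega]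
      have h2 : m % 2 < 2 := Nat.mod_lt _ (by omega)
      interval_cases hm : (m % 2) <;>
        simp only [List.foldl_cons, List.foldl_nil, List.length_cons, List.length_nil,
          show Nat.digitChar 0 = '0' from rfl, show Nat.digitChar 1 = '1' from rfl,
          reduceIte, hS] <;>
        · push_cast
          ring

-- base-4 value of the INVERTED binary digits of m (m ≥ 1)
theorem fold4_toDigits_inv (m : Nat) (hm : 1 ≤ m) (a : Int) :
    ((Nat.toDigits 2 m).map (fun c => if c = '1' then '0' else '1')).foldl
      (fun x c => x * 4 + (if c = '1' then 1 else 0)) a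
    = a * 4 ^ (Nat.toDigits 2 m).length + (pvS (2 ^ (Nat.toDigits 2 m).length - 1 - m) : Int) := by
  induction m using Nat.strong_induction_on generalizing a with
  | _ m ih =>
    rcases Nat.lt_or_ge m 2 with h | h
    · interval_cases m
      rw [Nat.toDigits_of_lt_base (by omega)]
      simp [pvS_zero, show Nat.digitChar 1 = '1' from rfl]
    · have hlen2 : m / 2 < 2 ^ (Nat.toDigits 2 (m / 2)).length :=
        (Nat.length_toDigits_le_iff (by omega) Nat.length_toDigits_pos).mp (le_refl _)
      rw [Nat.toDigits_of_base_le (by omega) h, List.map_append, List.foldl_append,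
        List.length_append]
      rw [ih (m / 2) (by omega) (by omega) a]
      have h2 : m % 2 < 2 := Nat.mod_lt _ (by omega)
      set L' := (Nat.toDigits 2 (m / 2)).length with hL'
      have hpow : 2 ^ (L' + 1) = 2 * 2 ^ L' := by rw [pow_succ]; ring
      have hw : pvS (2 ^ (L' + 1) - 1 - m)
          = (2 ^ (L' + 1) - 1 - m) % 2 + 4 * pvS ((2 ^ (L' + 1) - 1 - m) / 2) := by
        rw [pvS_eq]
        rcases Nat.eq_zero_or_pos (2 ^ (L' + 1) - 1 - m) with h0 | h0
        · rw [h0]; simp [pvS_zero]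
        · simp [show 2 ^ (L' + 1) - 1 - m ≠ 0 by omega]
      have hdiv : (2 ^ (L' + 1) - 1 - m) / 2 = 2 ^ L' - 1 - m / 2 := by omega
      have hmod : (2 ^ (L' + 1) - 1 - m) % 2 = 1 - m % 2 := by omega
      interval_cases hm2 : (m % 2) <;>
        simp only [List.map_cons, List.map_nil, List.foldl_cons, List.foldl_nil,
          List.length_cons, List.length_nil,
          show Nat.digitChar 0 = '0' from rfl, show Nat.digitChar 1 = '1' from rfl,
          reduceIte] <;>
        · rw [hw, hdiv, hmod]
          norm_num
          push_cast
          ring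

theorem bitLength_eq_length_toDigits (m : Nat) (hm : 1 ≤ m) :
    PySem.Int.bitLength (m : Int) = (Nat.toDigits 2 m).length := by
  induction m using Nat.strong_induction_on with
  | _ m ih =>
    rcases Nat.lt_or_ge m 2 with h | h
    · interval_cases m
      rw [Nat.toDigits_of_lt_base (by omega)]
      decide
    · rw [PySem.Int.bitLength_natCast (by omega), Nat.toDigits_of_base_le (by omega) h,
        List.length_append, ih (m / 2) (by omega) (by omega)]
      rfl

theorem xor_parity (m k : Nat) : (m ^^^ k) % 2 = (m % 2 + k % 2) % 2 := by
  have h := Nat.testBit_xor m k 0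
  simp only [Nat.testBit_zero] at h
  rcases Nat.mod_two_eq_zero_or_one m with h1 | h1 <;>
    rcases Nat.mod_two_eq_zero_or_one k with h2 | h2 <;>
    rcases Nat.mod_two_eq_zero_or_one (m ^^^ k) with h3 | h3 <;> simp_all

theorem xor_mask (L m : Nat) (h : m < 2 ^ L) : m ^^^ (2 ^ L - 1) = 2 ^ L - 1 - m := by
  induction L generalizing m with
  | zero => interval_cases m; decide
  | succ L ih =>
    have hp : 2 ^ (L + 1) = 2 * 2 ^ L := by rw [pow_succ]; ring
    have hd : (m ^^^ (2 ^ (L + 1) - 1)) / 2 = (m / 2) ^^^ (2 ^ L - 1) := by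
      rw [Nat.xor_div_two]
      congr 1
      omega
    rw [ih (m / 2) (by omega)] at hd
    have hm : (m ^^^ (2 ^ (L + 1) - 1)) % 2 = (m % 2 + (2 ^ (L + 1) - 1) % 2) % 2 :=
      xor_parity ..
    have h1 : 0 < 2 ^ L := by positivity
    have := Nat.div_add_mod (m ^^^ (2 ^ (L + 1) - 1)) 2
    omega

theorem pvSpread_eq_aux : ∀ (k : Nat) (v q r : Int), 0 ≤ v → v.toNat = k →
    pvSpread v q r = r + q * (pvS v.toNat : Int) := by
  intro k
  induction k using Nat.strong_induction_on with
  | _ k ih =>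
    intro v q r hv hk
    rw [pvSpread]
    by_cases h0 : v ≤ 0
    · have : v = 0 := le_antisymm h0 hv
      subst this
      rw [if_pos (by omega)]
      rw [pvS_eq]
      simp
    · rw [if_neg h0]
      have hsh : v >>> (1 : Nat) = v / 2 := by
        rw [Int.shiftRight_eq_div_pow]; norm_num
      have htn : (v >>> (1 : Nat)).toNat = v.toNat / 2 := by rw [hsh]; omega
      rw [ih ((v >>> (1 : Nat)).toNat) (by rw [htn]; omega) _ _ _
        (by rw [hsh]; positivity) rfl]
      rw [htn]
      have hband : PySem.Int.band v 1 = v % 2 := by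
        rw [PySem.Int.band_one, PySem.Int.mod_eq_emod_of_pos (by omega)]
      have hSm : pvS v.toNat = v.toNat % 2 + 4 * pvS (v.toNat / 2) := by
        rw [pvS_eq]; simp [show v.toNat ≠ 0 by omega]
      rw [hband, hSm]
      by_cases hpar : v % 2 = 0
      · rw [if_neg (by simpa using hpar), show v.toNat % 2 = 0 by omega]
        push_cast
        ring
      · rw [if_pos (by simpa using hpar), show v.toNat % 2 = 1 by omega]
        push_cast
        ring

theorem pvSpread_eq (v q r : Int) (hv : 0 ≤ v) :
    pvSpread v q r = r + q * (pvS v.toNat : Int) :=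
  pvSpread_eq_aux v.toNat v q r hv rfl

-- ===== VERDICT (by name: the statement is the Claim_ definition above) =====
theorem f_spec : Claim_equal_f := by
  intro n _ hpre
  unfold Spec_f f f_alt
  have hpre' : (0 : Int) ≤ n := hpre
  set m := n.toNat with hm
  have hn : n = (m : Int) := (Int.toNat_of_nonneg hpre').symm
  have hb0 : PySem.List.slice (PySem.Int.toBinChars0b n) (some 2) none = Nat.toDigits 2 m := by
    rw [show PySem.Int.toBinChars0b n = '0' :: 'b' :: Nat.toDigits 2 n.toNat from by
      rw [PySem.Int.toBinChars0b, if_neg (by omega)]]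
    exact (PySem.List.slice_from _ (show (0:Int) ≤ 2 by norm_num)).trans rfl
  have hds01 := digits01 m
  have hdsne : Nat.toDigits 2 m ≠ [] := by
    have := @Nat.length_toDigits_pos 2 m
    intro hc
    rw [hc] at this
    simp at this
  have hflatne : ∀ (s : List Char), s ≠ [] → s.flatMap (fun c => [c, c]) ≠ [] := by
    intro s hs
    cases s with
    | nil => exact absurd rfl hs
    | cons c t => simp
  simp only [hb0]
  by_cases hpar : PySem.Int.mod n 2 = 0
  · -- even n: no inversion, v = n
    rw [if_neg (by simpa using hpar), if_pos hpar]
    rw [PySem.List.foldl_append_eq_flatMap, List.nil_append]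
    rw [pvInt2?, if_neg (hflatne _ hdsne)]
    rw [pvInt2_fold _ hds01 0]
    have hf := fold4_factor (Nat.toDigits 2 m) 0
    rw [show (3 : Int) * 0 = 0 from by ring] at hf
    rw [hf, fold4_toDigits, Option.getD_some]
    rw [pvSpread_eq n 1 0 hpre']
    ring
  · -- odd n: the three replaces invert the digits, v = n ^ ((1 << L) - 1)
    have hm1 : 1 ≤ m := by
      rcases Nat.eq_zero_or_pos m with h0 | h0
      · exfalso; apply hpar; rw [hn, h0]; decide
      · exact h0
    rw [if_pos (by simpa using hpar), if_neg hpar]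
    rw [replace_single, replace_single, replace_single, List.map_map, List.map_map]
    rw [List.map_congr_left (l := Nat.toDigits 2 m)
      (g := fun c => if c = '1' then '0' else '1')
      (fun c hc => by rcases hds01 c hc with rfl | rfl <;> rfl)]
    rw [PySem.List.foldl_append_eq_flatMap, List.nil_append]
    have hinv01 : ∀ c ∈ (Nat.toDigits 2 m).map (fun c => if c = '1' then '0' else '1'),
        c = '0' ∨ c = '1' := by
      intro c hc
      rcases List.mem_map.mp hc with ⟨c', _, rfl⟩
      by_cases h1 : c' = '1' <;> simp [h1]
    rw [pvInt2?, if_neg (hflatne _ (by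
      intro hc
      exact hdsne (List.map_eq_nil_iff.mp hc)))]
    rw [pvInt2_fold _ hinv01 0]
    have hf := fold4_factor ((Nat.toDigits 2 m).map (fun c => if c = '1' then '0' else '1')) 0
    rw [show (3 : Int) * 0 = 0 from by ring] at hf
    rw [hf, fold4_toDigits_inv m hm1 0, Option.getD_some]
    -- now the B side
    set L := (Nat.toDigits 2 m).length with hL
    have hbl : PySem.Int.bitLength n = L := by rw [hn]; exact bitLength_eq_length_toDigits m hm1
    have hmask : ((1 : Int) <<< PySem.Int.bitLength n) - 1 = ((2 ^ L - 1 : Nat) : Int) := by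
      rw [hbl]
      have : (1 : Int) <<< L = ((2 ^ L : Nat) : Int) := by
        rw [Int.shiftLeft_eq]
        push_cast
        ring
      rw [this]
      have : (1 : Nat) ≤ 2 ^ L := Nat.one_le_two_pow
      push_cast [this]
      ring
    have hmlt : m < 2 ^ L := by
      have := PySem.Int.lt_two_pow_bitLength n
      rw [hbl] at this
      simpa [hn] using this
    have hv : PySem.Int.bxor n (((1 : Int) <<< PySem.Int.bitLength n) - 1)
        = ((2 ^ L - 1 - m : Nat) : Int) := by
      rw [hmask, hn, PySem.Int.bxor_of_nonneg (by positivity) (by positivity)]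
      simp only [Int.toNat_natCast]
      rw [xor_mask L m hmlt]
    rw [hv, pvSpread_eq _ 1 0 (by positivity)]
    simp only [Int.toNat_natCast]
    ring
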